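-- pv_equiv track=rewrite | github.com/areElkin/netflow | netflow/_utils.py | fuse_labels
-- ===== SOURCE A (Python) =====
-- from collections import OrderedDict
-- from itertools import zip_longest
--
-- def _local_join_strings(strings, delim=None):
--     """ Return delimiter-joined unique strings.
--
--     The resulting string is formed by delimiter-joining the unique
--     strings, ordered by the first time they appear.
--
--     Parameters
--     ----------
--     strings : Iterable(`str`)
--         Strings to be joined.
--     delim : `str`
--         The delimiter used to join the unique strings, default = '_'.
--
--
--     Returns
--     -------
--     joined_string : `str`
--         The delimiter-joined string of unique strings.
--     """
--     if delim is None: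
--         delim = "_"
--     strings = list(OrderedDict.fromkeys(strings))
--     joined_string = delim.join([k for k in strings if k is not None])
--     return joined_string
--
-- def fuse_labels(labels, delim=None):
--     """ Fuse labels
--
--     Each label is expected to be a string consisting of multiple substrings
--     concatenated by a delimiter. Each label is split using the delimiter. The fused
--     label is constructed by joining the substrings in the same order so that common
--     substrings appear once and all label-specific substrings are added ordered by the
--     original labels, and is prepended with "fused".
--
--     See below for an example.
--
--     .. note::
--        Currently, it is not possible to specify a substring of  underscore-joined
--        strings to be treated as a single substring (e.g., "my_feature_description" in
--        the label "X_my_feature_description_euc_distance").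
--
--        The labels do not need to have the same number of delimited substrings, but
--        if they don't, the fused label may not be as expected.
--
--     Parameters
--     ----------
--     labels : list(str)
--         Labels that should be fused.
--     delim : str
--         The delimiter, default = '_'.
--
--     Returns
--     ------
--     fused_label : str
--         The fused label
--
--     Examples
--     --------
--     >>> fuse_labels(["X_euc_distance", "X_wass_distance"])
--     >>> "fused_X_euc_wass_distance"
--
--     """
--     # ensure unique labels:
--     if len(labels) > len(set(labels)):
--         raise ValueError("Duplicate labels detected, all labels must be unique.")
--
--     if delim is None:
--         delim = '_'
--
--     fused_label = [_local_join_strings(strings, delim=delim) \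
--                    for strings in zip_longest(*[k.split(delim) for k in labels])]
--
--     fused_label = delim.join(["fused"] + fused_label)
--     return fused_label
-- ===== SOURCE B (Python) =====
-- def fuse_labels(labels, delim=None):
--     if len(labels) > len(set(labels)):
--         raise ValueError("Duplicate labels detected, all labels must be unique.")
--     if delim is None:
--         delim = '_'
--     columns = []  # one ordered set (dict) of tokens per position
--     for label in labels:
--         for i, tok in enumerate(label.split(delim)):
--             if i < len(columns):
--                 columns[i][tok] = None
--             else:
--                 columns.append({tok: None})
--     return delim.join(["fused"] + [delim.join(col) for col in columns])
-- ===== Notes on version B (the rewrite author's own statement) =====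
-- stated objective: alternative
-- what changed: Replaces A's zip_longest transpose plus a per-column dedup-and-join helper with a single left-to-right pass over the labels that maintains one ordered set (dict) of tokens per position, appending new positions as longer labels appear.
import Mathlib
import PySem

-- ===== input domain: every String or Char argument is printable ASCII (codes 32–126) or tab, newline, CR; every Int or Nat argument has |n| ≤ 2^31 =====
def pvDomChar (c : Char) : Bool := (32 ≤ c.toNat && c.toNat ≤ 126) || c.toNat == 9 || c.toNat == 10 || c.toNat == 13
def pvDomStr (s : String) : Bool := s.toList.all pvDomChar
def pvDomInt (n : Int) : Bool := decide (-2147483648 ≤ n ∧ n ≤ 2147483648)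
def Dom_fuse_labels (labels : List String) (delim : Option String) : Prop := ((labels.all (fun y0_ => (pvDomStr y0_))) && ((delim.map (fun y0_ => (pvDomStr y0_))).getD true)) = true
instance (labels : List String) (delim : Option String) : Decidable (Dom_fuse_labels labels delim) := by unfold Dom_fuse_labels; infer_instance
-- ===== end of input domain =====

-- B replaces A's zip_longest transpose + per-column dedup helper by a single left-to-right
-- pass that maintains one ordered set of tokens per position (objective: alternative decomposition).
-- Both A and B raise ValueError on duplicate labels; Pre_ excludes those inputs and the
-- raising empty-delimiter case, and there the ports return "".

-- ===== PORT A =====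
-- port of _local_join_strings (argument is a zip_longest column, so elements are Optional)
def localJoinStrings (strings : List (Option String)) (delim : String) : String :=
  PySem.Str.join delim ((PySem.List.dedup strings).filterMap id)

-- termination helper for zipLongest (cited by decreasing_by)
theorem pv_sum_tail_lt (ls : List (List String)) (h : ls.any (fun l => !l.isEmpty) = true) :
    ((ls.map List.tail).map List.length).sum < (ls.map List.length).sum := by
  induction ls with
  | nil => simp at h
  | cons x xs ih =>
    simp only [List.any_cons, Bool.or_eq_true] at h
    simp only [List.map_cons, List.sum_cons]
    rcases h with h | h
    · have hx : x ≠ [] := by cases x <;> simp_all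
      have : x.tail.length < x.length := by cases x <;> simp_all
      have h2 : ((xs.map List.tail).map List.length).sum ≤ (xs.map List.length).sum := by
        clear ih; induction xs with
        | nil => simp
        | cons y ys ih2 =>
          simp only [List.map_cons, List.sum_cons]
          have : y.tail.length ≤ y.length := by cases y <;> simp
          omega
      omega
    · have := ih h
      have : x.tail.length ≤ x.length := by cases x <;> simp
      omega

-- itertools.zip_longest over the split label parts (each row is one zip tuple)
def zipLongest (ls : List (List String)) : List (List (Option String)) :=
  if h : ls.any (fun l => !l.isEmpty) = true then
    (ls.map List.head?) :: zipLongest (ls.map List.tail)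
  else []
termination_by (ls.map List.length).sum
decreasing_by simpa using pv_sum_tail_lt ls h

def fuse_labels (labels : List String) (delim : Option String) : String :=
  if labels.length > (PySem.Set.ofList labels).length then ""  -- ValueError path (outside Pre_)
  else
    let d := delim.getD "_"
    -- [k.split(delim) for k in labels]; split? is none only for delim = "" (outside Pre_)
    let fused := (zipLongest (labels.map (fun k => (PySem.Str.split? k d).getD []))).map
      (fun strings => localJoinStrings strings d)
    PySem.Str.join d ("fused" :: fused)

-- ===== PORT B =====
-- insert the i-th token of one label into columns[i], appending new columns at the end
def insertTokens (cols : List (PySem.Set String)) (toks : List String) : List (PySem.Set String) :=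
  match cols, toks with
  | cols, [] => cols
  | [], t :: ts => PySem.Set.add PySem.Set.empty t :: insertTokens [] ts
  | c :: cs, t :: ts => PySem.Set.add c t :: insertTokens cs ts

def fuse_labels_alt (labels : List String) (delim : Option String) : String :=
  if labels.length > (PySem.Set.ofList labels).length then ""  -- ValueError path (outside Pre_)
  else
    let d := delim.getD "_"
    let cols := labels.foldl
      (fun cols k => insertTokens cols ((PySem.Str.split? k d).getD [])) []
    PySem.Str.join d ("fused" :: cols.map (fun c => PySem.Str.join d c))

-- ===== PRECONDITION & SPEC =====
-- Pre_ excludes exactly the inputs where Python A raises: duplicate labels (ValueError),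
-- and delim = "" with labels nonempty (str.split raises ValueError on an empty separator).
def Pre_fuse_labels (labels : List String) (delim : Option String) : Prop :=
  labels.Nodup ∧ (delim = some "" → labels = [])
instance (labels : List String) (delim : Option String) : Decidable (Pre_fuse_labels labels delim) := by
  unfold Pre_fuse_labels; infer_instance

def pvWitness_fuse_labels : List String × Option String :=
  (["X_euc_distance", "X_wass_distance"], none)

def Spec_fuse_labels (labels : List String) (delim : Option String) (out : String) : Prop := out = fuse_labels_alt labels delim
instance (labels : List String) (delim : Option String) (out : String) : Decidable (Spec_fuse_labels labels delim out) := by unfold Spec_fuse_labels; infer_instance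

-- ===== CLAIM (what is proved, stated in full; the proofs are below) =====
def Claim_equal_fuse_labels : Prop := ∀ (labels : List String) (delim : Option String), Dom_fuse_labels labels delim → Pre_fuse_labels labels delim → Spec_fuse_labels labels delim (fuse_labels labels delim)

-- ===== LEMMAS AND PROOFS =====

-- maximum row length
def maxl (ss : List (List String)) : Nat := (ss.map List.length).foldr max 0

-- the set of tokens seen at position j, in first-appearance order
def colF (ss : List (List String)) (j : Nat) : PySem.Set String :=
  PySem.Set.ofList (ss.filterMap (fun l => l[j]?))

theorem maxl_tail (ss : List (List String)) : maxl (ss.map List.tail) = maxl ss - 1 := by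
  induction ss with
  | nil => simp [maxl]
  | cons x xs ih =>
    simp only [maxl, List.map_cons, List.foldr_cons] at *
    have : x.tail.length = x.length - 1 := by cases x <;> simp
    omega


theorem maxl_cons (x : List String) (xs : List (List String)) :
    maxl (x :: xs) = max x.length (maxl xs) := rfl

theorem length_le_maxl (ss : List (List String)) (l : List String) (h : l ∈ ss) :
    l.length ≤ maxl ss := by
  induction ss with
  | nil => simp at h
  | cons x xs ih =>
    rw [maxl_cons]
    rcases List.mem_cons.mp h with h | h
    · subst h; omega
    · have := ih h; omega

theorem maxl_append (ss : List (List String)) (p : List String) :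
    maxl (ss ++ [p]) = max (maxl ss) p.length := by
  induction ss with
  | nil => simp [maxl]
  | cons x xs ih =>
    rw [List.cons_append, maxl_cons, ih, maxl_cons]
    omega

theorem maxl_eq_zero_of_all_nil (ss : List (List String)) (h : ∀ l ∈ ss, l = []) :
    maxl ss = 0 := by
  induction ss with
  | nil => rfl
  | cons x xs ih =>
    rw [maxl_cons, h x (by simp), ih (fun l hl => h l (List.mem_cons_of_mem _ hl))]
    rfl

theorem fm_eq_nil (ss : List (List String)) (j : Nat) (h : maxl ss ≤ j) :
    ss.filterMap (fun l => l[j]?) = [] := by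
  rw [List.filterMap_eq_nil_iff]
  intro l hl
  have := length_le_maxl ss l hl
  simp; omega

theorem zipLongest_eq (ss : List (List String)) :
    zipLongest ss = (List.range (maxl ss)).map (fun j => ss.map (fun l => l[j]?)) := by
  induction ss using zipLongest.induct with
  | case1 ss h ih =>
    have ih' : zipLongest (ss.map List.tail)
        = (List.range (maxl (ss.map List.tail))).map
            (fun j => (ss.map List.tail).map (fun l => l[j]?)) := by
      simpa using ih
    rw [zipLongest, dif_pos h, ih']
    have hpos : 0 < maxl ss := by
      simp only [List.any_eq_true, Bool.not_eq_eq_eq_not, Bool.not_true] at h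
      obtain ⟨l, hl, hne⟩ := h
      have h2 := length_le_maxl ss l hl
      cases l with
      | nil => simp at hne
      | cons a as => simp only [List.length_cons] at h2; omega
    rw [maxl_tail]
    obtain ⟨n, hn⟩ : ∃ n, maxl ss = n + 1 := ⟨maxl ss - 1, by omega⟩
    rw [hn]
    simp only [Nat.add_sub_cancel, List.range_succ_eq_map, List.map_cons, List.map_map]
    congr 1
    · simp [List.head?_eq_getElem?]
    · apply List.map_congr_left
      intro j _
      simp [Function.comp, List.map_map, List.getElem?_tail]
  | case2 ss h =>
    have hall : ∀ l ∈ ss, l = [] := by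
      intro l hl
      by_contra hne
      exact h (by
        simp only [List.any_eq_true]
        exact ⟨l, hl, by cases l with | nil => exact absurd rfl hne | cons a as => simp⟩)
    rw [zipLongest, dif_neg h, maxl_eq_zero_of_all_nil ss hall]
    rfl

theorem foldl_add_filterMap (c : List (Option String)) :
    ∀ s : List (Option String),
      (c.foldl PySem.Set.add s).filterMap id
        = (c.filterMap id).foldl PySem.Set.add (s.filterMap id) := by
  induction c with
  | nil => intro s; rfl
  | cons x xs ih =>
    intro s
    cases x with
    | none =>
      simp only [List.foldl_cons]
      rw [show ((none : Option String) :: xs).filterMap id = xs.filterMap id from by simp]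
      rw [ih]
      congr 1
      rw [PySem.Set.add_eq_ite]
      split
      · rfl
      · simp
    | some a =>
      simp only [List.foldl_cons]
      rw [show (some a :: xs).filterMap id = a :: xs.filterMap id from by simp]
      rw [ih, List.foldl_cons]
      congr 1
      have hmem : some a ∈ s ↔ a ∈ s.filterMap id := by
        simp [List.mem_filterMap]
      by_cases hc : some a ∈ s
      · rw [PySem.Set.add_eq_ite, if_pos hc, PySem.Set.add_eq_ite, if_pos (hmem.mp hc)]
      · rw [PySem.Set.add_eq_ite, if_neg hc, PySem.Set.add_eq_ite,
            if_neg (fun hh => hc (hmem.mpr hh))]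
        simp

theorem ofList_filterMap (c : List (Option String)) :
    (PySem.Set.ofList c).filterMap id = PySem.Set.ofList (c.filterMap id) := by
  rw [PySem.Set.ofList_eq_foldl, PySem.Set.ofList_eq_foldl]
  simpa using foldl_add_filterMap c []

theorem insertTokens_getElem? (toks : List String) :
    ∀ (cols : List (PySem.Set String)) (j : Nat),
      (insertTokens cols toks)[j]? =
        match cols[j]?, toks[j]? with
        | some c, some t => some (PySem.Set.add c t)
        | some c, none   => some c
        | none,   some t => some (PySem.Set.add PySem.Set.empty t)
        | none,   none   => none := by
  induction toks with
  | nil =>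
    intro cols j
    cases h : cols[j]? <;> simp [insertTokens, h]
  | cons t ts ih =>
    intro cols j
    cases cols with
    | nil =>
      cases j with
      | zero => simp [insertTokens]
      | succ n => simpa [insertTokens] using ih [] n
    | cons c cs =>
      cases j with
      | zero => simp [insertTokens]
      | succ n => simpa [insertTokens] using ih cs n

theorem colF_append_singleton (ss : List (List String)) (p : List String) (j : Nat) :
    colF (ss ++ [p]) j =
      match p[j]? with
      | some t => PySem.Set.add (colF ss j) t
      | none => colF ss j := by
  unfold colF
  rw [List.filterMap_append]
  cases h : p[j]? with
  | none => simp [h]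
  | some t => simp [h, PySem.Set.ofList_append_singleton]

theorem foldl_insert_getElem? (ss : List (List String)) (j : Nat) :
    (ss.foldl insertTokens [])[j]? = if j < maxl ss then some (colF ss j) else none := by
  induction ss using List.reverseRecOn with
  | nil => simp [maxl]
  | append_singleton ss p ih =>
    rw [List.foldl_append, List.foldl_cons, List.foldl_nil,
        insertTokens_getElem? p (ss.foldl insertTokens []) j, ih,
        colF_append_singleton, maxl_append]
    cases h2 : p[j]? with
    | none =>
      have hp : ¬ j < p.length := by have := List.getElem?_eq_none_iff.mp h2; omega
      by_cases h1 : j < maxl ss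
      · rw [if_pos h1, if_pos (by omega)]
      · rw [if_neg h1, if_neg (by omega)]
    | some t =>
      have hp : j < p.length := (List.getElem?_eq_some_iff.mp h2).1
      have he : colF ss j = PySem.Set.empty ∨ j < maxl ss := by
        by_cases h1 : j < maxl ss
        · exact Or.inr h1
        · exact Or.inl (by unfold colF; rw [fm_eq_nil ss j (by omega)]; rfl)
      by_cases h1 : j < maxl ss
      · rw [if_pos h1, if_pos (by omega)]
      · rw [if_neg h1, if_pos (by omega)]
        rcases he with he | he
        · rw [he]
        · omega

theorem foldl_insert_eq (ss : List (List String)) :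
    ss.foldl insertTokens [] = (List.range (maxl ss)).map (colF ss) := by
  apply List.ext_getElem?
  intro j
  rw [foldl_insert_getElem?]
  by_cases h : j < maxl ss
  · simp [h]
  · rw [if_neg h]
    symm
    rw [List.getElem?_eq_none_iff]
    simp
    omega

theorem port_col_eq (ss : List (List String)) (d : String) (j : Nat) :
    localJoinStrings (ss.map (fun l => l[j]?)) d = PySem.Str.join d (colF ss j) := by
  unfold localJoinStrings colF
  rw [PySem.List.dedup_eq_ofList, ofList_filterMap, List.filterMap_map]
  rfl

theorem fuse_labels_spec : Claim_equal_fuse_labels := by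
  intro labels delim _ hpre
  obtain ⟨hnodup, -⟩ := hpre
  unfold Spec_fuse_labels fuse_labels fuse_labels_alt
  have h0 := PySem.Set.ofList_eq_self_of_nodup labels hnodup
  rw [h0, if_neg (lt_irrefl _), if_neg (lt_irrefl _)]
  simp only []
  rw [← List.foldl_map, foldl_insert_eq, zipLongest_eq, List.map_map, List.map_map]
  congr 1
  congr 1
  apply List.map_congr_left
  intro j _
  exact port_col_eq _ _ j
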